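-- pv_equiv track=rewrite | github.com/JaeHyeon-KAIST/coding-3 | experiments/rc_tempo/abstract_graph.py | full_map_bfs
-- ===== SOURCE A (Python) =====
-- from collections import deque
--
-- def full_map_bfs(walls, start, W, H):
--     """BFS through all non-wall cells. Returns dict[cell -> dist]."""
--     dists = {start: 0}
--     q = deque([start])
--     while q:
--         p = q.popleft()
--         x, y = p
--         d = dists[p]
--         for dx, dy in [(1, 0), (-1, 0), (0, 1), (0, -1)]:
--             nx, ny = x + dx, y + dy
--             if not (0 <= nx < W and 0 <= ny < H):
--                 continue
--             r = H - 1 - ny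
--             if walls[r][nx]:
--                 continue
--             n = (nx, ny)
--             if n in dists:
--                 continue
--             dists[n] = d + 1
--             q.append(n)
--     return dists
-- ===== SOURCE B (Python) =====
-- def full_map_bfs(walls, start, W, H):
--     """Staged level BFS: per level, build the flat candidate list, filter it
--     against the pre-level dict, dedup with a seen-set, then batch-insert the
--     whole next frontier. Returns dict[cell -> dist] in A's insertion order."""
--     def open_cell(n):
--         nx, ny = n
--         return 0 <= nx < W and 0 <= ny < H and not walls[H - 1 - ny][nx]
--
--     dists = {start: 0}
--     frontier = [start]
--     lvl = 0
--     while frontier: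
--         cand = [n for (x, y) in frontier
--                   for n in ((x + 1, y), (x - 1, y), (x, y + 1), (x, y - 1))]
--         fresh = [n for n in cand if open_cell(n) and n not in dists]
--         seen = set()
--         nxt = []
--         for n in fresh:
--             if n not in seen:
--                 seen.add(n)
--                 nxt.append(n)
--         for n in nxt:
--             dists[n] = lvl + 1
--         frontier = nxt
--         lvl += 1
--     return dists
-- ===== Notes on version B (the rewrite author's own statement) =====
-- stated objective: alternative
-- what changed: Replaces the deque-driven node-at-a-time BFS (per-neighbor dict mutation interleaved with the queue) by a staged level-synchronous BFS: each level builds a flat candidate list, filters it against the pre-level dict, dedups it with a seen-set, and batch-inserts the whole next frontier with an explicit distance counter; same dict, same insertion order.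
import Mathlib
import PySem

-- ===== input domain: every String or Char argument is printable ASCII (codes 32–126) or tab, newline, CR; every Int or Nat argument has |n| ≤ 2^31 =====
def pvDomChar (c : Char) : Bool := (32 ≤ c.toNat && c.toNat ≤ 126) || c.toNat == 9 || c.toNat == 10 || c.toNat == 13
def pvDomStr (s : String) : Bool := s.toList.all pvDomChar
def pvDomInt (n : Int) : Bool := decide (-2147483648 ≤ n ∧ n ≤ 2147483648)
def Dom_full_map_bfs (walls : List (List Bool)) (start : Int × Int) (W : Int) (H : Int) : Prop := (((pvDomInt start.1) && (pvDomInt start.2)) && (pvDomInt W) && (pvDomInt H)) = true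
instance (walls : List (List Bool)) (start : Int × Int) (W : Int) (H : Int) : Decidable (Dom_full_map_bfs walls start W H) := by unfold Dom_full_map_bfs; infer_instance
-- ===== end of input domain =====

-- B replaces A's deque-driven node-at-a-time BFS by a staged level-synchronous BFS:
-- each level builds the flat candidate list, filters it against the pre-level dict,
-- dedups it with a seen-set, then batch-inserts the whole next frontier; objective:
-- alternative decomposition, same exact dict (insertion order included).
-- Both ports use a Nat fuel argument purely as a totality guard; the chosen fuel is
-- proved sufficient (the loops always exit before it runs out).

-- ===== PORT A =====

-- the neighbour offsets [(1, 0), (-1, 0), (0, 1), (0, -1)]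
def fmbDirs : List (Int × Int) := [(1, 0), (-1, 0), (0, 1), (0, -1)]

-- fuel guard for the while-loops (a bound on the number of steps, proved sufficient below)
def fmbFuel (W H : Int) : Nat := 2 * (W.toNat * H.toNat + 1)

-- body of A's inner `for dx, dy in …` loop; state = (dists, nodes appended to the queue)
def fmbVisitA (walls : List (List Bool)) (W H : Int) (x y dval : Int)
    (st : PySem.Dict (Int × Int) Int × List (Int × Int)) (dxy : Int × Int) :
    PySem.Dict (Int × Int) Int × List (Int × Int) :=
  let nx := x + dxy.1
  let ny := y + dxy.2
  if ¬ (0 ≤ nx ∧ nx < W ∧ 0 ≤ ny ∧ ny < H) then st            -- continue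
  else if PySem.List.pyGetD (PySem.List.pyGetD walls (H - 1 - ny) []) nx false then st
    -- walls[H-1-ny][nx]; both indices are in range under Pre_full_map_bfs, the getD defaults are unreachable there
  else if st.1.contains (nx, ny) then st                       -- n in dists: continue
  else (st.1.insert (nx, ny) (dval + 1), st.2 ++ [(nx, ny)])   -- dists[n] = d+1; q.append(n)

-- A's `while q` loop; queue elements are always dict keys, so dists[p] is getD with an unreachable default
def fmbLoopA (walls : List (List Bool)) (W H : Int) :
    Nat → PySem.Dict (Int × Int) Int → List (Int × Int) → PySem.Dict (Int × Int) Int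
  | 0, dists, _ => dists
  | _ + 1, dists, [] => dists
  | fuel + 1, dists, p :: q =>
      let d := dists.getD p 0
      let st := fmbDirs.foldl (fmbVisitA walls W H p.1 p.2 d) (dists, [])
      fmbLoopA walls W H fuel st.1 (q ++ st.2)

def full_map_bfs (walls : List (List Bool)) (start : Int × Int) (W : Int) (H : Int) :
    List (Int × Int × Int) :=
  let dists := PySem.Dict.ofList [(start, (0 : Int))]
  let res := fmbLoopA walls W H (fmbFuel W H) dists [start]
  res.items.map (fun kv => (kv.1.1, kv.1.2, kv.2))

-- ===== PORT B =====

-- B's `open_cell`: bounds check plus wall lookup (indices in range under Pre_full_map_bfs)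
def fmbOpen (walls : List (List Bool)) (W H : Int) (n : Int × Int) : Bool :=
  decide (0 ≤ n.1 ∧ n.1 < W ∧ 0 ≤ n.2 ∧ n.2 < H) &&
  !(PySem.List.pyGetD (PySem.List.pyGetD walls (H - 1 - n.2) []) n.1 false)

-- B's `cand` comprehension: all four neighbours of every frontier cell, flattened
def fmbCand (f : List (Int × Int)) : List (Int × Int) :=
  f.flatMap (fun p => [(p.1 + 1, p.2), (p.1 - 1, p.2), (p.1, p.2 + 1), (p.1, p.2 - 1)])

-- B's `fresh` comprehension: open candidates not yet in dists (the pre-level dict)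
def fmbFresh (walls : List (List Bool)) (W H : Int) (dists : PySem.Dict (Int × Int) Int)
    (f : List (Int × Int)) : List (Int × Int) :=
  (fmbCand f).filter (fun n => fmbOpen walls W H n && !(dists.contains n))

-- B's seen-set dedup loop over `fresh`
def fmbDedup : List (Int × Int) → PySem.Set (Int × Int) → List (Int × Int)
  | [], _ => []
  | n :: ns, seen =>
      if PySem.Set.contains seen n then fmbDedup ns seen
      else n :: fmbDedup ns (PySem.Set.add seen n)

-- B's `while frontier` loop: filter, dedup, then batch-insert the whole next frontier
def fmbLoopB (walls : List (List Bool)) (W H : Int) :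
    Nat → PySem.Dict (Int × Int) Int → List (Int × Int) → Int → PySem.Dict (Int × Int) Int
  | 0, dists, _, _ => dists
  | _ + 1, dists, [], _ => dists
  | fuel + 1, dists, p :: f, lvl =>
      let nxt := fmbDedup (fmbFresh walls W H dists (p :: f)) PySem.Set.empty
      let dists' := nxt.foldl (fun dd n => dd.insert n (lvl + 1)) dists
      fmbLoopB walls W H fuel dists' nxt (lvl + 1)

def full_map_bfs_alt (walls : List (List Bool)) (start : Int × Int) (W : Int) (H : Int) :
    List (Int × Int × Int) :=
  let dists := PySem.Dict.ofList [(start, (0 : Int))]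
  let res := fmbLoopB walls W H (fmbFuel W H) dists [start] 0
  res.items.map (fun kv => (kv.1.1, kv.1.2, kv.2))

-- ===== PRECONDITION & SPEC =====
-- Pre_ admits the inputs on which walls[H-1-ny][nx] cannot raise IndexError: either no
-- neighbour of start lies in the W×H box (so walls is never indexed), or walls covers the
-- whole announced H×W box. Excluded are only inputs with an undersized wall grid that a
-- neighbour of start can enter: there whether A raises depends on which cells the whole
-- search reaches (not closed-form), and on some of them A still returns normally.
def Pre_full_map_bfs (walls : List (List Bool)) (start : Int × Int) (W : Int) (H : Int) : Prop :=
  ¬ ((0 ≤ start.1 + 1 ∧ start.1 + 1 < W ∧ 0 ≤ start.2 ∧ start.2 < H) ∨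
     (0 ≤ start.1 - 1 ∧ start.1 - 1 < W ∧ 0 ≤ start.2 ∧ start.2 < H) ∨
     (0 ≤ start.1 ∧ start.1 < W ∧ 0 ≤ start.2 + 1 ∧ start.2 + 1 < H) ∨
     (0 ≤ start.1 ∧ start.1 < W ∧ 0 ≤ start.2 - 1 ∧ start.2 - 1 < H)) ∨
  (H ≤ (walls.length : Int) ∧ ∀ row ∈ walls, W ≤ (row.length : Int))
instance (walls : List (List Bool)) (start : Int × Int) (W : Int) (H : Int) : Decidable (Pre_full_map_bfs walls start W H) := by unfold Pre_full_map_bfs; infer_instance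

def pvWitness_full_map_bfs : List (List Bool) × (Int × Int) × Int × Int :=
  ([[false, false], [false, true]], (0, 0), 2, 2)

def Spec_full_map_bfs (walls : List (List Bool)) (start : Int × Int) (W : Int) (H : Int) (out : List (Int × Int × Int)) : Prop := out = full_map_bfs_alt walls start W H
instance (walls : List (List Bool)) (start : Int × Int) (W : Int) (H : Int) (out : List (Int × Int × Int)) : Decidable (Spec_full_map_bfs walls start W H out) := by unfold Spec_full_map_bfs; infer_instance

-- ===== CLAIM (what is proved, stated in full; the proofs are below) =====
def Claim_equal_full_map_bfs : Prop := ∀ (walls : List (List Bool)) (start : Int × Int) (W : Int) (H : Int), Dom_full_map_bfs walls start W H → Pre_full_map_bfs walls start W H → Spec_full_map_bfs walls start W H (full_map_bfs walls start W H)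

-- ===== LEMMAS AND PROOFS =====

-- bridge step function: A's per-neighbour body, reparametrised by the target cell
def fmbVisitB (walls : List (List Bool)) (W H lvl : Int)
    (st : PySem.Dict (Int × Int) Int × List (Int × Int)) (n : Int × Int) :
    PySem.Dict (Int × Int) Int × List (Int × Int) :=
  if fmbOpen walls W H n && !(st.1.contains n)
  then (st.1.insert n (lvl + 1), st.2 ++ [n])
  else st

-- the four neighbour cells of one cell (fmbCand f = f.flatMap (fmbNbrs …))
def fmbNbrs (x y : Int) : List (Int × Int) := [(x + 1, y), (x - 1, y), (x, y + 1), (x, y - 1)]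

-- the cells the dict can ever hold: the start plus the in-box cells
noncomputable def fmbS (start : Int × Int) (W H : Int) : Finset (Int × Int) :=
  insert start (Finset.Icc 0 (W - 1) ×ˢ Finset.Icc 0 (H - 1))

-- dict invariant: unique keys, all inside fmbS
def fmbInv (start : Int × Int) (W H : Int) (d : PySem.Dict (Int × Int) Int) : Prop :=
  d.keys.Nodup ∧ ∀ k ∈ d.keys, k ∈ fmbS start W H

-- loop measure
noncomputable def fmbM (start : Int × Int) (W H : Int) (d : PySem.Dict (Int × Int) Int)
    (q : List (Int × Int)) : Nat :=
  2 * ((fmbS start W H).card - d.size) + q.length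

-- one whole level as A computes it: fold of the bridge step over the flat candidates
def fmbEL (walls : List (List Bool)) (W H lvl : Int) (d : PySem.Dict (Int × Int) Int)
    (f : List (Int × Int)) : PySem.Dict (Int × Int) Int × List (Int × Int) :=
  (fmbCand f).foldl (fmbVisitB walls W H lvl) (d, [])

theorem fmb_size_le (start : Int × Int) (W H : Int) (d : PySem.Dict (Int × Int) Int)
    (h : fmbInv start W H d) : d.size ≤ (fmbS start W H).card := by
  obtain ⟨hnd, hmem⟩ := h
  have h1 : d.size = d.keys.length := by
    simp [PySem.Dict.size, PySem.Dict.keys]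
  have h2 : d.keys.toFinset ⊆ fmbS start W H := by
    intro k hk; exact hmem k (List.mem_toFinset.mp hk)
  calc d.size = d.keys.toFinset.card := by rw [h1, List.toFinset_card_of_nodup hnd]
    _ ≤ _ := Finset.card_le_card h2

theorem fmb_card_le (start : Int × Int) (W H : Int) :
    (fmbS start W H).card ≤ W.toNat * H.toNat + 1 := by
  unfold fmbS
  calc (insert start (Finset.Icc 0 (W - 1) ×ˢ Finset.Icc 0 (H - 1))).card
      ≤ (Finset.Icc (0:Int) (W - 1) ×ˢ Finset.Icc (0:Int) (H - 1)).card + 1 :=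
        Finset.card_insert_le _ _
    _ ≤ W.toNat * H.toNat + 1 := by
        rw [Finset.card_product, Int.card_Icc, Int.card_Icc]
        have e1 : W - 1 + 1 - 0 = W := by ring
        have e2 : H - 1 + 1 - 0 = H := by ring
        rw [e1, e2]

theorem fmb_visitAB (walls : List (List Bool)) (W H : Int) (x y dv : Int)
    (st : PySem.Dict (Int × Int) Int × List (Int × Int)) (dx dy : Int) :
    fmbVisitA walls W H x y dv st (dx, dy) = fmbVisitB walls W H dv st (x + dx, y + dy) := by
  unfold fmbVisitA fmbVisitB fmbOpen
  by_cases hb : (0 ≤ x + dx ∧ x + dx < W ∧ 0 ≤ y + dy ∧ y + dy < H)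
  · by_cases hw : PySem.List.pyGetD (PySem.List.pyGetD walls (H - 1 - (y + dy)) []) (x + dx) false = true
    · simp [hb, hw]
    · by_cases hc : st.1.contains (x + dx, y + dy) = true
      · simp [hb, hw, hc]
      · simp [hb, hw, hc]
  · simp [hb]

-- one A-node expansion is the bridge-step fold over that node's neighbours
theorem fmb_node (walls : List (List Bool)) (W H : Int) (x y dv : Int)
    (st : PySem.Dict (Int × Int) Int × List (Int × Int)) :
    fmbDirs.foldl (fmbVisitA walls W H x y dv) st
      = (fmbNbrs x y).foldl (fmbVisitB walls W H dv) st := by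
  simp only [fmbDirs, fmbNbrs, List.foldl, fmb_visitAB, add_zero, ← sub_eq_add_neg]

-- accumulator shift for fmbVisitB folds
theorem fmb_shift (walls : List (List Bool)) (W H lvl : Int) :
    ∀ (cands : List (Int × Int)) (d : PySem.Dict (Int × Int) Int) (a : List (Int × Int)),
    cands.foldl (fmbVisitB walls W H lvl) (d, a)
      = ((cands.foldl (fmbVisitB walls W H lvl) (d, [])).1,
          a ++ (cands.foldl (fmbVisitB walls W H lvl) (d, [])).2) := by
  intro cands
  induction cands with
  | nil => intro d a; simp
  | cons c cs ih =>
      intro d a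
      simp only [List.foldl_cons]
      by_cases hc : (fmbOpen walls W H c && !(d.contains c)) = true
      · rw [show fmbVisitB walls W H lvl (d, a) c = (d.insert c (lvl+1), a ++ [c]) from by
            simp [fmbVisitB, hc],
          show fmbVisitB walls W H lvl (d, []) c = (d.insert c (lvl+1), [c]) from by
            simp [fmbVisitB, hc]]
        rw [ih (d.insert c (lvl+1)) (a ++ [c]), ih (d.insert c (lvl+1)) [c]]
        simp
      · rw [show fmbVisitB walls W H lvl (d, a) c = (d, a) from by
            simp only [fmbVisitB]; rw [if_neg hc],
          show fmbVisitB walls W H lvl (d, []) c = (d, []) from by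
            simp only [fmbVisitB]; rw [if_neg hc]]
        exact ih d a

-- peeling one frontier cell off an fmbEL level
theorem fmb_el_cons (walls : List (List Bool)) (W H lvl : Int)
    (d : PySem.Dict (Int × Int) Int) (p : Int × Int) (f : List (Int × Int)) :
    fmbEL walls W H lvl d (p :: f)
      = ((fmbEL walls W H lvl ((fmbNbrs p.1 p.2).foldl (fmbVisitB walls W H lvl) (d, [])).1 f).1,
         ((fmbNbrs p.1 p.2).foldl (fmbVisitB walls W H lvl) (d, [])).2
           ++ (fmbEL walls W H lvl ((fmbNbrs p.1 p.2).foldl (fmbVisitB walls W H lvl) (d, [])).1 f).2) := by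
  unfold fmbEL
  have hc : fmbCand (p :: f) = fmbNbrs p.1 p.2 ++ fmbCand f := rfl
  rw [hc, List.foldl_append]
  rw [← Prod.mk.eta (p := (fmbNbrs p.1 p.2).foldl (fmbVisitB walls W H lvl) (d, []))]
  rw [fmb_shift]

-- CHARACTERISATION: the bridge-step fold is exactly B's staged filter/dedup/batch-insert
theorem fmb_char (walls : List (List Bool)) (W H lvl : Int) :
    ∀ (cands : List (Int × Int)) (d0 d : PySem.Dict (Int × Int) Int)
      (seen : PySem.Set (Int × Int)) (acc : List (Int × Int)),
    (∀ n, d.contains n = (d0.contains n || PySem.Set.contains seen n)) →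
    cands.foldl (fmbVisitB walls W H lvl) (d, acc)
      = ((fmbDedup (cands.filter (fun n => fmbOpen walls W H n && !(d0.contains n))) seen).foldl
            (fun dd n => dd.insert n (lvl + 1)) d,
          acc ++ fmbDedup (cands.filter (fun n => fmbOpen walls W H n && !(d0.contains n))) seen) := by
  intro cands
  induction cands with
  | nil => intro d0 d seen acc _; simp [fmbDedup]
  | cons c cs ih =>
      intro d0 d seen acc h1
      simp only [List.foldl_cons, List.filter_cons]
      by_cases hopen : fmbOpen walls W H c = true
      · by_cases hd : d.contains c = true
        · have hv : fmbVisitB walls W H lvl (d, acc) c = (d, acc) := by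
            simp [fmbVisitB, hd]
          rw [hv]
          by_cases hd0 : d0.contains c = true
          · -- d0 has c: the filter drops c
            rw [if_neg (by simp [hd0])]
            exact ih d0 d seen acc h1
          · -- d0 misses c, so the seen-set has it: filter keeps c, dedup drops it
            have hd0' : d0.contains c = false := by simpa using hd0
            have hseen : PySem.Set.contains seen c = true := by
              rcases Bool.eq_false_or_eq_true (PySem.Set.contains seen c) with hs | hs
              · exact hs
              · exfalso
                have h := h1 c
                rw [hd0', hs, hd] at h
                simp at h
            rw [if_pos (by simp [hopen, hd0'])]
            have hmem : c ∈ seen := (PySem.Set.contains_iff seen c).mp hseen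
            rw [show fmbDedup (c :: cs.filter (fun n => fmbOpen walls W H n && !(d0.contains n))) seen
                = fmbDedup (cs.filter (fun n => fmbOpen walls W H n && !(d0.contains n))) seen from by
              simp [fmbDedup, hmem]]
            exact ih d0 d seen acc h1
        · -- c is genuinely new: inserted, appended, and kept by filter+dedup
          have hd' : d.contains c = false := by simpa using hd
          have hd0 : d0.contains c = false := by
            have h := h1 c
            rw [hd'] at h
            rcases Bool.eq_false_or_eq_true (d0.contains c) with h2 | h2
            · rw [h2] at h; simp at h
            · exact h2
          have hseen : PySem.Set.contains seen c = false := by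
            have h := h1 c
            rw [hd', hd0] at h
            rcases Bool.eq_false_or_eq_true (PySem.Set.contains seen c) with h2 | h2
            · rw [h2] at h; simp at h
            · exact h2
          have hv : fmbVisitB walls W H lvl (d, acc) c = (d.insert c (lvl+1), acc ++ [c]) := by
            simp [fmbVisitB, hopen, hd']
          rw [hv]
          rw [if_pos (by simp [hopen, hd0])]
          have hnmem : c ∉ seen := by
            intro hmem
            rw [(PySem.Set.contains_iff seen c).mpr hmem] at hseen; cases hseen
          rw [show fmbDedup (c :: cs.filter (fun n => fmbOpen walls W H n && !(d0.contains n))) seen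
              = c :: fmbDedup (cs.filter (fun n => fmbOpen walls W H n && !(d0.contains n)))
                  (PySem.Set.add seen c) from by
            simp [fmbDedup, hnmem]]
          have h1' : ∀ n, (d.insert c (lvl+1)).contains n
              = (d0.contains n || PySem.Set.contains (PySem.Set.add seen c) n) := by
            intro n
            rw [PySem.Dict.contains_insert, h1 n]
            have hadd : PySem.Set.add seen c = seen ++ [c] := by
              apply PySem.Set.add_of_not_mem
              intro hmem
              rw [(PySem.Set.contains_iff seen c).mpr hmem] at hseen; cases hseen
            rw [hadd]
            simp only [PySem.Set.contains_eq_listContains, List.contains_append]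
            cases h2 : (n == c) <;> cases h3 : d0.contains n <;>
              cases h4 : List.contains seen n <;> simp_all
          rw [ih d0 (d.insert c (lvl+1)) (PySem.Set.add seen c) (acc ++ [c]) h1']
          simp [List.foldl_cons, List.append_assoc]
      · -- not an open cell: A's body skips it and the filter drops it
        have hopen' : fmbOpen walls W H c = false := by simpa using hopen
        have hv : fmbVisitB walls W H lvl (d, acc) c = (d, acc) := by
          simp [fmbVisitB, hopen']
        rw [hv]
        rw [if_neg (by simp [hopen'])]
        exact ih d0 d seen acc h1

-- dedup output: members come from the input and were not already seen
theorem fmb_dedup_mem :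
    ∀ (l : List (Int × Int)) (seen : PySem.Set (Int × Int)) (n : Int × Int),
    n ∈ fmbDedup l seen → n ∈ l ∧ PySem.Set.contains seen n = false := by
  intro l
  induction l with
  | nil => intro seen n h; cases h
  | cons c cs ih =>
      intro seen n h
      unfold fmbDedup at h
      by_cases hs : PySem.Set.contains seen c = true
      · rw [if_pos hs] at h
        obtain ⟨h1, h2⟩ := ih seen n h
        exact ⟨List.mem_cons_of_mem _ h1, h2⟩
      · rw [if_neg hs] at h
        rcases List.mem_cons.mp h with rfl | h'
        · exact ⟨List.mem_cons_self, by simpa using hs⟩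
        · obtain ⟨h1, h2⟩ := ih _ n h'
          refine ⟨List.mem_cons_of_mem _ h1, ?_⟩
          rcases Bool.eq_false_or_eq_true (PySem.Set.contains seen n) with h3 | h3
          · have : n ∈ PySem.Set.add seen c :=
              (PySem.Set.mem_add _ _ _).mpr (.inl ((PySem.Set.contains_iff _ _).mp h3))
            rw [(PySem.Set.contains_iff _ _).mpr this] at h2; cases h2
          · exact h3
  
-- dedup output has no duplicates
theorem fmb_dedup_nodup :
    ∀ (l : List (Int × Int)) (seen : PySem.Set (Int × Int)), (fmbDedup l seen).Nodup := by
  intro l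
  induction l with
  | nil => intro seen; simp [fmbDedup]
  | cons c cs ih =>
      intro seen
      unfold fmbDedup
      by_cases hs : PySem.Set.contains seen c = true
      · rw [if_pos hs]; exact ih seen
      · rw [if_neg hs]
        refine List.nodup_cons.mpr ⟨?_, ih _⟩
        intro hmem
        have h2 := (fmb_dedup_mem cs (PySem.Set.add seen c) c hmem).2
        have : c ∈ PySem.Set.add seen c := (PySem.Set.mem_add _ _ _).mpr (.inr rfl)
        rw [(PySem.Set.contains_iff _ _).mpr this] at h2; cases h2

-- batch-insert fold: keys not in the list keep their binding
theorem fmb_ins_notmem (lvl : Int) :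
    ∀ (L : List (Int × Int)) (d : PySem.Dict (Int × Int) Int) (n : Int × Int), n ∉ L →
    (L.foldl (fun dd m => dd.insert m (lvl + 1)) d).get? n = d.get? n := by
  intro L
  induction L with
  | nil => intro d n _; rfl
  | cons m ms ih =>
      intro d n hn
      simp only [List.foldl_cons]
      rw [ih _ n (fun h => hn (List.mem_cons_of_mem _ h)),
          PySem.Dict.get?_insert_of_ne _ _ (fun h => hn (by rw [h]; exact List.mem_cons_self))]

-- batch-insert fold: every listed key gets the level value
theorem fmb_ins_mem (lvl : Int) :
    ∀ (L : List (Int × Int)) (d : PySem.Dict (Int × Int) Int) (n : Int × Int),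
    L.Nodup → n ∈ L →
    (L.foldl (fun dd m => dd.insert m (lvl + 1)) d).get? n = some (lvl + 1) := by
  intro L
  induction L with
  | nil => intro d n _ h; cases h
  | cons m ms ih =>
      intro d n hnd hn
      simp only [List.foldl_cons]
      rcases List.mem_cons.mp hn with rfl | h'
      · rw [fmb_ins_notmem lvl ms _ n (List.nodup_cons.mp hnd).1, PySem.Dict.get?_insert_self]
      · exact ih _ n (List.nodup_cons.mp hnd).2 h'

-- batch-insert fold: the size grows by the number of fresh keys
theorem fmb_ins_size (lvl : Int) :
    ∀ (L : List (Int × Int)) (d : PySem.Dict (Int × Int) Int),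
    L.Nodup → (∀ n ∈ L, d.contains n = false) →
    (L.foldl (fun dd m => dd.insert m (lvl + 1)) d).size = d.size + L.length := by
  intro L
  induction L with
  | nil => intro d _ _; simp
  | cons m ms ih =>
      intro d hnd hfresh
      simp only [List.foldl_cons]
      have hstep : (d.insert m (lvl + 1)).size = d.size + 1 := by
        rw [PySem.Dict.size_insert]; simp [hfresh m List.mem_cons_self]
      have hfresh' : ∀ n ∈ ms, (d.insert m (lvl + 1)).contains n = false := by
        intro n hn
        rw [PySem.Dict.contains_insert]
        have hne : (n == m) = false := by
          simp only [beq_eq_false_iff_ne, ne_eq]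
          rintro rfl; exact (List.nodup_cons.mp hnd).1 hn
        rw [hne, hfresh n (List.mem_cons_of_mem _ hn)]; rfl
      rw [ih _ (List.nodup_cons.mp hnd).2 hfresh', hstep]
      simp [List.length_cons]; omega

-- batch-insert fold preserves the dict invariant when the keys lie in the box
theorem fmb_ins_inv (start : Int × Int) (W H lvl : Int) :
    ∀ (L : List (Int × Int)) (d : PySem.Dict (Int × Int) Int),
    (∀ n ∈ L, n ∈ fmbS start W H) → fmbInv start W H d →
    fmbInv start W H (L.foldl (fun dd m => dd.insert m (lvl + 1)) d) := by
  intro L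
  induction L with
  | nil => intro d _ h; exact h
  | cons m ms ih =>
      intro d hbox hinv
      simp only [List.foldl_cons]
      refine ih _ (fun n hn => hbox n (List.mem_cons_of_mem _ hn)) ?_
      refine ⟨PySem.Dict.nodup_keys_insert _ _ _ hinv.1, ?_⟩
      intro k hk
      rcases (PySem.Dict.mem_keys_insert _ _ _ _).mp hk with rfl | hk'
      · exact hbox k List.mem_cons_self
      · exact hinv.2 k hk'

-- open cells lie in the cell universe fmbS
theorem fmb_open_box (walls : List (List Bool)) (start : Int × Int) (W H : Int) (n : Int × Int)
    (h : fmbOpen walls W H n = true) : n ∈ fmbS start W H := by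
  unfold fmbOpen at h
  have hb : 0 ≤ n.1 ∧ n.1 < W ∧ 0 ≤ n.2 ∧ n.2 < H := by
    rw [Bool.and_eq_true] at h
    exact of_decide_eq_true h.1
  exact Finset.mem_insert.mpr (.inr (by
    simp only [Finset.mem_product, Finset.mem_Icc]; omega))

-- a whole A-level equals B's staged next-frontier computation
theorem fmb_level (walls : List (List Bool)) (W H lvl : Int)
    (d : PySem.Dict (Int × Int) Int) (f : List (Int × Int)) :
    fmbEL walls W H lvl d f
      = ((fmbDedup (fmbFresh walls W H d f) PySem.Set.empty).foldl
            (fun dd n => dd.insert n (lvl + 1)) d,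
          fmbDedup (fmbFresh walls W H d f) PySem.Set.empty) := by
  unfold fmbEL fmbFresh
  rw [fmb_char walls W H lvl (fmbCand f) d d PySem.Set.empty [] (by intro n; simp [PySem.Set.empty])]
  simp

theorem fmb_loopA_nil (walls : List (List Bool)) (W H : Int) (fuel : Nat)
    (d : PySem.Dict (Int × Int) Int) : fmbLoopA walls W H fuel d [] = d := by
  cases fuel <;> rfl

-- fmbLoopA processes a whole frontier exactly as one fmbEL level
theorem fmb_la (walls : List (List Bool)) (start : Int × Int) (W H lvl : Int) :
    ∀ (f rest : List (Int × Int)) (fuel : Nat) (d : PySem.Dict (Int × Int) Int),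
    fmbInv start W H d → (∀ p ∈ f, d.get? p = some lvl) →
    fmbLoopA walls W H (f.length + fuel) d (f ++ rest)
      = fmbLoopA walls W H fuel (fmbEL walls W H lvl d f).1
          (rest ++ (fmbEL walls W H lvl d f).2) := by
  intro f
  induction f with
  | nil => intro rest fuel d _ _; simp [fmbEL, fmbCand]
  | cons p f' ih =>
      intro rest fuel d hinv hf
      have hlen : (p :: f').length + fuel = (f'.length + fuel) + 1 := by
        simp [List.length_cons]; omega
      rw [hlen]
      have hq : (p :: f') ++ rest = p :: (f' ++ rest) := rfl
      rw [hq]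
      show fmbLoopA walls W H (f'.length + fuel)
          (fmbDirs.foldl (fmbVisitA walls W H p.1 p.2 (d.getD p 0)) (d, [])).1
          ((f' ++ rest) ++ (fmbDirs.foldl (fmbVisitA walls W H p.1 p.2 (d.getD p 0)) (d, [])).2)
        = _
      have hgetD : d.getD p 0 = lvl := by
        rw [PySem.Dict.getD_eq_get?_getD, hf p List.mem_cons_self]; rfl
      rw [hgetD, fmb_node]
      -- characterise the one-node expansion as a batch insert of its fresh neighbours
      have hnode := fmb_char walls W H lvl (fmbNbrs p.1 p.2) d d PySem.Set.empty []
        (by intro n; simp [PySem.Set.empty])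
      set Lp := fmbDedup ((fmbNbrs p.1 p.2).filter
        (fun n => fmbOpen walls W H n && !(d.contains n))) PySem.Set.empty with hLp
      rw [List.nil_append] at hnode
      have hfreshLp : ∀ n ∈ Lp, d.contains n = false := by
        intro n hn
        have := (fmb_dedup_mem _ _ n hn).1
        have h2 := List.of_mem_filter this
        rw [Bool.and_eq_true] at h2
        simpa using h2.2
      have hboxLp : ∀ n ∈ Lp, n ∈ fmbS start W H := by
        intro n hn
        have := (fmb_dedup_mem _ _ n hn).1
        have h2 := List.of_mem_filter this
        rw [Bool.and_eq_true] at h2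
        exact fmb_open_box walls start W H n h2.1
      have hinv1 : fmbInv start W H
          ((fmbNbrs p.1 p.2).foldl (fmbVisitB walls W H lvl) (d, [])).1 := by
        rw [hnode]
        exact fmb_ins_inv start W H lvl Lp d hboxLp hinv
      have hf' : ∀ q ∈ f',
          ((fmbNbrs p.1 p.2).foldl (fmbVisitB walls W H lvl) (d, [])).1.get? q = some lvl := by
        intro q hq'
        have hg := hf q (List.mem_cons_of_mem _ hq')
        have hcont : d.contains q = true := by
          rcases Bool.eq_false_or_eq_true (d.contains q) with hct | hcf
          · exact hct
          · rw [(PySem.Dict.get?_eq_none_iff_contains d q).mpr hcf] at hg; cases hg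
        have hqL : q ∉ Lp := by
          intro hmem; rw [hfreshLp q hmem] at hcont; cases hcont
        rw [hnode]
        rw [fmb_ins_notmem lvl Lp d q hqL]
        exact hg
      rw [List.append_assoc]
      rw [ih (rest ++ ((fmbNbrs p.1 p.2).foldl (fmbVisitB walls W H lvl) (d, [])).2)
          fuel _ hinv1 hf']
      rw [fmb_el_cons]
      simp [List.append_assoc]

-- the two loops agree whenever both fuels dominate the measure
theorem fmb_bridge (walls : List (List Bool)) (start : Int × Int) (W H : Int) :
    ∀ (g fuel : Nat) (d : PySem.Dict (Int × Int) Int) (f : List (Int × Int)) (lvl : Int),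
    fmbInv start W H d → (∀ p ∈ f, d.get? p = some lvl) →
    fmbM start W H d f ≤ fuel → fmbM start W H d f ≤ g →
    fmbLoopA walls W H fuel d f = fmbLoopB walls W H g d f lvl := by
  intro g
  induction g with
  | zero =>
      intro fuel d f lvl _ _ _ hg
      have hf : f = [] := by
        have : f.length = 0 := by unfold fmbM at hg; omega
        exact List.eq_nil_of_length_eq_zero this
      subst hf
      rw [fmb_loopA_nil]; rfl
  | succ g ih =>
      intro fuel d f lvl hinv hf hfuel hg
      cases f with
      | nil => rw [fmb_loopA_nil]; cases g <;> rfl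
      | cons p f' =>
          have hflen : (p :: f').length ≤ fuel := by unfold fmbM at hfuel; simp at hfuel ⊢; omega
          have hsplit : fuel = (p :: f').length + (fuel - (p :: f').length) := by omega
          rw [hsplit]
          have hla := fmb_la walls start W H lvl (p :: f') [] (fuel - (p :: f').length) d hinv hf
          rw [List.append_nil] at hla
          rw [hla, List.nil_append]
          -- A's level equals B's staged next frontier
          rw [fmb_level walls W H lvl d (p :: f')]
          set L := fmbDedup (fmbFresh walls W H d (p :: f')) PySem.Set.empty with hL
          -- the B side takes exactly one level step on the same data
          have hBstep : fmbLoopB walls W H (g + 1) d (p :: f') lvl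
              = fmbLoopB walls W H g
                  (L.foldl (fun dd n => dd.insert n (lvl + 1)) d) L (lvl + 1) := rfl
          rw [hBstep]
          -- facts about L for the induction hypothesis
          have hnodL : L.Nodup := fmb_dedup_nodup _ _
          have hfreshL : ∀ n ∈ L, d.contains n = false := by
            intro n hn
            have := (fmb_dedup_mem _ _ n hn).1
            have h2 := List.of_mem_filter this
            rw [Bool.and_eq_true] at h2
            simpa using h2.2
          have hboxL : ∀ n ∈ L, n ∈ fmbS start W H := by
            intro n hn
            have := (fmb_dedup_mem _ _ n hn).1
            have h2 := List.of_mem_filter this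
            rw [Bool.and_eq_true] at h2
            exact fmb_open_box walls start W H n h2.1
          have hinv1 : fmbInv start W H (L.foldl (fun dd n => dd.insert n (lvl + 1)) d) :=
            fmb_ins_inv start W H lvl L d hboxL hinv
          have hvals : ∀ q ∈ L,
              (L.foldl (fun dd n => dd.insert n (lvl + 1)) d).get? q = some (lvl + 1) :=
            fun q hq => fmb_ins_mem lvl L d q hnodL hq
          have hsz : (L.foldl (fun dd n => dd.insert n (lvl + 1)) d).size
              = d.size + L.length := fmb_ins_size lvl L d hnodL hfreshL
          have hle1 : d.size ≤ (fmbS start W H).card := fmb_size_le start W H d hinv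
          have hle2 : (L.foldl (fun dd n => dd.insert n (lvl + 1)) d).size
              ≤ (fmbS start W H).card := fmb_size_le start W H _ hinv1
          apply ih
          · exact hinv1
          · exact hvals
          all_goals
            unfold fmbM at hfuel hg ⊢
            simp only [List.length_cons] at hfuel hg ⊢
            omega

-- ===== VERDICT (by name: the statement is the Claim_ definition above) =====
theorem full_map_bfs_spec : Claim_equal_full_map_bfs := by
  intro walls start W H _ _
  unfold Spec_full_map_bfs
  simp only [full_map_bfs, full_map_bfs_alt]
  have hkeys : (PySem.Dict.ofList [(start, (0:Int))]).keys = [start] := rfl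
  have hget : (PySem.Dict.ofList [(start, (0:Int))]).get? start = some 0 := by
    have : PySem.Dict.ofList [(start, (0:Int))] = PySem.Dict.mk [(start, 0)] := rfl
    rw [this, PySem.Dict.get?_mk_cons]
    simp
  have hsize : (PySem.Dict.ofList [(start, (0:Int))]).size = 1 := rfl
  have hcard1 : 1 ≤ (fmbS start W H).card :=
    Finset.card_pos.mpr ⟨start, Finset.mem_insert_self _ _⟩
  have hb : fmbLoopA walls W H (fmbFuel W H) (PySem.Dict.ofList [(start, (0:Int))]) [start]
      = fmbLoopB walls W H (fmbFuel W H) (PySem.Dict.ofList [(start, (0:Int))]) [start] 0 := by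
    apply fmb_bridge walls start W H
    · refine ⟨by rw [hkeys]; simp, ?_⟩
      intro k hk
      rw [hkeys] at hk
      rw [List.mem_singleton.mp hk]
      exact Finset.mem_insert_self _ _
    · intro p hp
      rw [List.mem_singleton.mp hp]
      exact hget
    · unfold fmbM fmbFuel
      rw [hsize]
      have := fmb_card_le start W H
      simp only [List.length_cons, List.length_nil]
      omega
    · unfold fmbM fmbFuel
      rw [hsize]
      have := fmb_card_le start W H
      simp only [List.length_cons, List.length_nil]
      omega
  rw [hb]
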